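-- pv_equiv track=rewrite | github.com/rhedwan/PythonPractice | high_low.py | count_low_high
-- ===== SOURCE A (Python) =====
-- def count_low_high(num_list):
--     count_high = 0
--     count_low = 0
--     tracker = []
--     if len(num_list) == 0:
--         return None
--
--     for i in num_list :
--         if i > 50 or i % 3 == 0:
--             count_high += 1
--         else:
--             count_low += 1
--
--
--     tracker.extend([count_low, count_high])
--     return tracker
-- ===== SOURCE B (Python) =====
-- def count_low_high(num_list):
--     if len(num_list) == 0:
--         return None
--
--     def go(lo, hi):
--         # counts (low, high) over num_list[lo:hi], hi - lo >= 1
--         if hi - lo == 1: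
--             i = num_list[lo]
--             return (0, 1) if i > 50 or i % 3 == 0 else (1, 0)
--         mid = (lo + hi) // 2
--         l1, h1 = go(lo, mid)
--         l2, h2 = go(mid, hi)
--         return (l1 + l2, h1 + h2)
--
--     low, high = go(0, len(num_list))
--     return [low, high]
-- ===== Notes on version B (the rewrite author's own statement) =====
-- stated objective: alternative
-- what changed: Replaces A's single left-to-right pass with two parallel counters by a divide-and-conquer recursion that splits the index range in half, counts each half recursively, and sums the per-half (low, high) pairs.
import Mathlib
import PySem

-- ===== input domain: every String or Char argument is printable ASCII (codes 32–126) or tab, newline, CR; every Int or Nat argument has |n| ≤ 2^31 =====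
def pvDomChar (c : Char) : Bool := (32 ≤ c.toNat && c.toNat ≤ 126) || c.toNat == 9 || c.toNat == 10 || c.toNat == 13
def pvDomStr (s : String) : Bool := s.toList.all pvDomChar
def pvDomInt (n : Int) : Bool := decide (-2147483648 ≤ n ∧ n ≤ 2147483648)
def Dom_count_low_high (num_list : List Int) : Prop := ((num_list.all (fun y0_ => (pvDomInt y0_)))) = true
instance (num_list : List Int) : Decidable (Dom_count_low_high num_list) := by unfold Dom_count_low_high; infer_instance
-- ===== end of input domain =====

-- B replaces A's single left-to-right pass with two counters by a divide-and-conquer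
-- recursion over index ranges that sums per-half (low, high) pairs (alternative decomposition).

-- ===== PORT A =====
-- loop over num_list maintaining the two counters (count_high, count_low)
def count_low_high (num_list : List Int) : Option (List Int) :=
  if num_list.length = 0 then none
  else
    let p := num_list.foldl
      (fun (c : Int × Int) i =>
        if i > 50 ∨ PySem.Int.mod i 3 = 0 then (c.1 + 1, c.2) else (c.1, c.2 + 1))
      (0, 0)
    some ([] ++ [p.2, p.1])

-- ===== PORT B =====
-- go(lo, hi): (low, high) counts over num_list[lo:hi]; always called with lo < hi ≤ len
def clGo (num_list : List Int) (lo hi : Nat) : Int × Int :=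
  if hi - lo = 1 then
    -- i = num_list[lo]; lo is always in range at call sites, the none arm is unreachable
    match PySem.List.pyGet? num_list (lo : Int) with
    | some i => if i > 50 ∨ PySem.Int.mod i 3 = 0 then (0, 1) else (1, 0)
    | none => (0, 0)
  else if hi ≤ lo + 1 then (0, 0)  -- totality guard; unreachable (every call has lo < hi)
  else
    let mid := (lo + hi) / 2
    let p1 := clGo num_list lo mid
    let p2 := clGo num_list mid hi
    (p1.1 + p2.1, p1.2 + p2.2)
termination_by hi - lo
decreasing_by all_goals omega

def count_low_high_alt (num_list : List Int) : Option (List Int) :=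
  if num_list.length = 0 then none
  else
    let p := clGo num_list 0 num_list.length
    some [p.1, p.2]

-- ===== PRECONDITION & SPEC =====
def Spec_count_low_high (num_list : List Int) (out : Option (List Int)) : Prop := out = count_low_high_alt num_list
instance (num_list : List Int) (out : Option (List Int)) : Decidable (Spec_count_low_high num_list out) := by unfold Spec_count_low_high; infer_instance

-- ===== CLAIM (what is proved, stated in full; the proofs are below) =====
def Claim_equal_count_low_high : Prop := ∀ (num_list : List Int), Dom_count_low_high num_list → Spec_count_low_high num_list (count_low_high num_list)

-- ===== LEMMAS AND PROOFS =====

def pvHighP (i : Int) : Bool := decide (i > 50 ∨ PySem.Int.mod i 3 = 0)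

theorem foldl_counts (l : List Int) (a b : Int) :
    l.foldl
      (fun (c : Int × Int) i =>
        if i > 50 ∨ PySem.Int.mod i 3 = 0 then (c.1 + 1, c.2) else (c.1, c.2 + 1))
      (a, b)
    = (a + ((l.filter pvHighP).length : Int),
       b + ((l.filter (fun i => !pvHighP i)).length : Int)) := by
  induction l generalizing a b with
  | nil => simp
  | cons x xs ih =>
    simp only [List.foldl_cons, List.filter_cons, pvHighP]
    by_cases h : x > 50 ∨ PySem.Int.mod x 3 = 0
    · rw [if_pos h, ih]
      simp only [pvHighP, h, decide_true, Bool.not_true, if_true,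
        List.length_cons]
      rw [Prod.mk.injEq]
      constructor <;> (push_cast; ring)
    · rw [if_neg h, ih]
      simp only [pvHighP, h, decide_false, Bool.not_false, if_true,
        List.length_cons]
      rw [Prod.mk.injEq]
      constructor <;> (push_cast; ring)

theorem clGo_counts (l : List Int) : ∀ (n lo hi : Nat), hi - lo = n → lo < hi → hi ≤ l.length →
    clGo l lo hi =
      (((((l.drop lo).take (hi - lo)).filter (fun i => !pvHighP i)).length : Int),
       ((((l.drop lo).take (hi - lo)).filter pvHighP).length : Int)) := by
  intro n
  induction n using Nat.strong_induction_on with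
  | _ n ih =>
    intro lo hi hn hlt hle
    rw [clGo]
    by_cases h1 : hi - lo = 1
    · rw [if_pos h1]
      have hlo : lo < l.length := by omega
      rw [PySem.List.pyGet?_natCast, List.getElem?_eq_getElem hlo]
      have hdrop : l.drop lo = l[lo] :: l.drop (lo + 1) := List.drop_eq_getElem_cons hlo
      dsimp only
      by_cases h : l[lo] > 50 ∨ PySem.Int.mod l[lo] 3 = 0
      · rw [if_pos h]
        have hb : pvHighP l[lo] = true := by unfold pvHighP; exact decide_eq_true h
        rw [h1, hdrop]
        simp only [List.take_succ_cons, List.take_zero, List.filter_cons, List.filter_nil,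
          hb, Bool.not_true, if_true, Bool.false_eq_true, if_false, List.length_cons,
          List.length_nil]
        simp
      · rw [if_neg h]
        have hb : pvHighP l[lo] = false := by unfold pvHighP; exact decide_eq_false h
        rw [h1, hdrop]
        simp only [List.take_succ_cons, List.take_zero, List.filter_cons, List.filter_nil,
          hb, Bool.not_false, if_true, Bool.false_eq_true, if_false, List.length_cons,
          List.length_nil]
        simp
    · rw [if_neg h1, if_neg (by omega : ¬ hi ≤ lo + 1)]
      dsimp only
      have hm1 : lo < (lo + hi) / 2 := by omega
      have hm2 : (lo + hi) / 2 < hi := by omega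
      rw [ih ((lo + hi) / 2 - lo) (by omega) lo ((lo + hi) / 2) rfl hm1 (by omega),
          ih (hi - (lo + hi) / 2) (by omega) ((lo + hi) / 2) hi rfl hm2 hle]
      have hsplit : (l.drop lo).take (hi - lo)
          = (l.drop lo).take ((lo + hi) / 2 - lo)
            ++ ((l.drop lo).drop ((lo + hi) / 2 - lo)).take (hi - (lo + hi) / 2) := by
        rw [← List.take_add]
        congr 1
        omega
      have hdd : (l.drop lo).drop ((lo + hi) / 2 - lo) = l.drop ((lo + hi) / 2) := by
        rw [List.drop_drop]
        congr 1
        omega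
      rw [hsplit, hdd]
      simp [List.filter_append]

theorem filt_split (l : List Int) (p : Int → Bool) :
    (l.filter p).length + (l.filter (fun x => !p x)).length = l.length := by
  induction l with
  | nil => simp
  | cons x xs ih =>
    simp only [List.filter_cons, List.length_cons]
    cases h : p x <;> simp [List.length_cons, ← ih] <;> omega

-- ===== VERDICT (by name: the statement is the Claim_ definition above) =====
theorem count_low_high_spec : Claim_equal_count_low_high := by
  intro num_list _
  unfold Spec_count_low_high count_low_high count_low_high_alt
  by_cases h : num_list.length = 0
  · simp [h]
  · have hpos : 0 < num_list.length := Nat.pos_of_ne_zero h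
    rw [if_neg h, if_neg h]
    rw [clGo_counts num_list num_list.length 0 num_list.length (by omega) hpos le_rfl]
    simp only [List.drop_zero, Nat.sub_zero, List.take_length, foldl_counts]
    have hs := filt_split num_list pvHighP
    simp only [List.nil_append, Option.some.injEq, List.cons.injEq, and_true]
    constructor <;> (push_cast [← hs]; ring)
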